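-- pv_equiv track=rewrite | github.com/ivi982010/SySdL-TPs | Lexer.py | a_ParOpen
-- ===== SOURCE A (Python) =====
-- def a_ParOpen (tokens, acu):
--     s = 0
--     for c in acu:
--         if c == '(':
--             s = 1
--         else:
--             s = -1
--     if s == 1:
--         tokens.append(("<ParOpen>", acu))
--     return (s == 1)
-- ===== SOURCE B (Python) =====
-- def a_ParOpen(tokens, acu):
--     # closed form: loop result is 1 iff the last char of acu is '('
--     ok = bool(acu) and acu[-1] == '('
--     if ok:
--         tokens.append(("<ParOpen>", acu))
--     return ok
-- ===== Notes on version B (the rewrite author's own statement) =====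
-- stated objective: simpler
-- what changed: The per-character loop maintaining a flag is replaced by a direct closed-form test of the last character of acu (no iteration).
import Mathlib
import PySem

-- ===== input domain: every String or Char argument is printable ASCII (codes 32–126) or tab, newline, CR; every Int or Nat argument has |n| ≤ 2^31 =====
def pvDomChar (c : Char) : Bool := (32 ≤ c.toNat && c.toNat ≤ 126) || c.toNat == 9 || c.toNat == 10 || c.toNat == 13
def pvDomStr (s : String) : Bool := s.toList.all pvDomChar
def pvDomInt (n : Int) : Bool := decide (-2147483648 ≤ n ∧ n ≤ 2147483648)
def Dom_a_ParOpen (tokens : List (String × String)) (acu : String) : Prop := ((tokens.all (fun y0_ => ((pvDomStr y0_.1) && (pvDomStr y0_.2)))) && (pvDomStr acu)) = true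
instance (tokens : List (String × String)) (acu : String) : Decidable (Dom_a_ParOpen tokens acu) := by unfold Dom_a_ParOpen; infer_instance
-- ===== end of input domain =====

-- B replaces A's per-character loop with a direct last-character test (simpler); both Pythons append the same ("<ParOpen>", acu) token to `tokens` on success — the equivalence here is about the returned Bool only.


-- ===== PORT A =====
-- A: fold the flag update over acu's characters, then test s == 1
def a_ParOpen (tokens : List (String × String)) (acu : String) : Bool :=
  let s : Int := acu.toList.foldl (fun s c => if c = '(' then 1 else -1) 0
  s == 1

-- ===== PORT B =====
-- B: closed form — acu is non-empty and its last character is '('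
def a_ParOpen_alt (tokens : List (String × String)) (acu : String) : Bool :=
  !acu.toList.isEmpty && (acu.toList.getLast? == some '(')

-- ===== PRECONDITION & SPEC =====
def Spec_a_ParOpen (tokens : List (String × String)) (acu : String) (out : Bool) : Prop := out = a_ParOpen_alt tokens acu
instance (tokens : List (String × String)) (acu : String) (out : Bool) : Decidable (Spec_a_ParOpen tokens acu out) := by unfold Spec_a_ParOpen; infer_instance

-- ===== CLAIM (what is proved, stated in full; the proofs are below) =====
def Claim_equal_a_ParOpen : Prop := ∀ (tokens : List (String × String)) (acu : String), Dom_a_ParOpen tokens acu → Spec_a_ParOpen tokens acu (a_ParOpen tokens acu)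

-- ===== LEMMAS AND PROOFS =====

-- ===== VERDICT (by name: the statement is the Claim_ definition above) =====
theorem pv_fold_last (l : List Char) :
    ((l.foldl (fun s c => if c = '(' then (1:Int) else -1) 0 == 1) : Bool)
      = (!l.isEmpty && (l.getLast? == some '(')) := by
  induction l using List.reverseRecOn with
  | nil => rfl
  | append_singleton xs x _ =>
    simp [List.foldl_append, List.getLast?_append]
    by_cases h : x = '(' <;> simp [h]

theorem a_ParOpen_spec : Claim_equal_a_ParOpen := by
  intro tokens acu _
  unfold Spec_a_ParOpen a_ParOpen a_ParOpen_alt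
  exact pv_fold_last acu.toList
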